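-- pv_equiv track=rewrite | github.com/ProjectBA14/pm-internship-allocation-engine | backend/services/enhanced_internship_service.py | _infer_skills_from_category
-- ===== SOURCE A (Python) =====
-- from typing import Dict, List, Any, Optional
--
-- def _infer_skills_from_category(text_lower: str) -> List[str]:
--     """Infer skills based on category keywords in text"""
--     if any(word in text_lower for word in ['software', 'developer', 'programming', 'coding', 'web']):
--         return ['JavaScript', 'HTML', 'CSS', 'React', 'Node.js', 'Git']
--     elif any(word in text_lower for word in ['data science', 'data analyst', 'analytics']):
--         return ['Python', 'SQL', 'Excel', 'Data Analysis', 'Statistics', 'Tableau']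
--     elif any(word in text_lower for word in ['marketing', 'digital marketing', 'social media']):
--         return ['Digital Marketing', 'Social Media', 'SEO', 'Google Analytics', 'Content Writing']
--     elif any(word in text_lower for word in ['design', 'ui', 'ux', 'graphic']):
--         return ['Figma', 'Photoshop', 'UI/UX', 'Adobe XD', 'Illustrator']
--     elif any(word in text_lower for word in ['finance', 'accounting', 'financial']):
--         return ['Excel', 'Financial Analysis', 'Accounting', 'Data Analysis']
--     else:
--         return ['Communication', 'Problem Solving', 'Team Work', 'Microsoft Office']
-- ===== SOURCE B (Python) =====
-- from typing import List
--
-- _SKILLS = [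
--     ['JavaScript', 'HTML', 'CSS', 'React', 'Node.js', 'Git'],
--     ['Python', 'SQL', 'Excel', 'Data Analysis', 'Statistics', 'Tableau'],
--     ['Digital Marketing', 'Social Media', 'SEO', 'Google Analytics', 'Content Writing'],
--     ['Figma', 'Photoshop', 'UI/UX', 'Adobe XD', 'Illustrator'],
--     ['Excel', 'Financial Analysis', 'Accounting', 'Data Analysis'],
--     ['Communication', 'Problem Solving', 'Team Work', 'Microsoft Office'],
-- ]
--
-- _KEYWORDS = (
--     [(w, 0) for w in ['software', 'developer', 'programming', 'coding', 'web']] +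
--     [(w, 1) for w in ['data science', 'data analyst', 'analytics']] +
--     [(w, 2) for w in ['marketing', 'digital marketing', 'social media']] +
--     [(w, 3) for w in ['design', 'ui', 'ux', 'graphic']] +
--     [(w, 4) for w in ['finance', 'accounting', 'financial']]
-- )
--
-- def _infer_skills_from_category(text_lower: str) -> List[str]:
--     # single flat pass over all keywords, keeping the minimum matched rule index
--     best = 5
--     for word, idx in _KEYWORDS:
--         if idx < best and word in text_lower:
--             best = idx
--     return _SKILLS[best]
-- ===== Notes on version B (the rewrite author's own statement) =====
-- stated objective: alternative
-- what changed: Instead of A's early-return if/elif cascade of per-category any() checks, B makes one flat pass over all (keyword, category-index) pairs maintaining a minimum-matched-index accumulator and finally indexes into a skills table.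
import Mathlib
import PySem

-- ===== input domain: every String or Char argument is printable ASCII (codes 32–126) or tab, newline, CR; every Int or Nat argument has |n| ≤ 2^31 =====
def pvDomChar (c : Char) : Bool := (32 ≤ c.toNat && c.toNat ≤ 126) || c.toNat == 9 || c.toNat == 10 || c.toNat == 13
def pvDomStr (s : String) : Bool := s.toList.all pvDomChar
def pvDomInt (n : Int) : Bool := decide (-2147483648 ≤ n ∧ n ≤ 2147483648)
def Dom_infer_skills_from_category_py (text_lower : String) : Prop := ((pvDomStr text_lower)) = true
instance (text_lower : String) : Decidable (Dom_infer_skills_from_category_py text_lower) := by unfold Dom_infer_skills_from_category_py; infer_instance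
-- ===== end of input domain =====

-- B replaces A's early-return if/elif cascade by one flat pass over (keyword, rule-index) pairs
-- keeping the minimum matched index, then a table lookup (alternative; same cost).

-- ===== PORT A =====
-- Literal transliteration of A's branch cascade; 'word in text_lower' is PySem.Str.isIn.
def infer_skills_from_category_py (text_lower : String) : List String :=
  if (["software", "developer", "programming", "coding", "web"].any
        fun word => PySem.Str.isIn word text_lower) then
    ["JavaScript", "HTML", "CSS", "React", "Node.js", "Git"]
  else if (["data science", "data analyst", "analytics"].any
        fun word => PySem.Str.isIn word text_lower) then
    ["Python", "SQL", "Excel", "Data Analysis", "Statistics", "Tableau"]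
  else if (["marketing", "digital marketing", "social media"].any
        fun word => PySem.Str.isIn word text_lower) then
    ["Digital Marketing", "Social Media", "SEO", "Google Analytics", "Content Writing"]
  else if (["design", "ui", "ux", "graphic"].any
        fun word => PySem.Str.isIn word text_lower) then
    ["Figma", "Photoshop", "UI/UX", "Adobe XD", "Illustrator"]
  else if (["finance", "accounting", "financial"].any
        fun word => PySem.Str.isIn word text_lower) then
    ["Excel", "Financial Analysis", "Accounting", "Data Analysis"]
  else
    ["Communication", "Problem Solving", "Team Work", "Microsoft Office"]

-- ===== PORT B =====
def pvSkillTable : List (List String) :=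
  [ ["JavaScript", "HTML", "CSS", "React", "Node.js", "Git"],
    ["Python", "SQL", "Excel", "Data Analysis", "Statistics", "Tableau"],
    ["Digital Marketing", "Social Media", "SEO", "Google Analytics", "Content Writing"],
    ["Figma", "Photoshop", "UI/UX", "Adobe XD", "Illustrator"],
    ["Excel", "Financial Analysis", "Accounting", "Data Analysis"],
    ["Communication", "Problem Solving", "Team Work", "Microsoft Office"] ]

-- Source B's _KEYWORDS: the five keyword groups tagged with their rule index, concatenated
def pvKeywords : List (String × Nat) :=
  (["software", "developer", "programming", "coding", "web"].map (fun w => (w, 0))) ++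
  (["data science", "data analyst", "analytics"].map (fun w => (w, 1))) ++
  (["marketing", "digital marketing", "social media"].map (fun w => (w, 2))) ++
  (["design", "ui", "ux", "graphic"].map (fun w => (w, 3))) ++
  (["finance", "accounting", "financial"].map (fun w => (w, 4)))

-- the loop body of Source B: keep the minimum matched rule index
def pvStep (t : String) (best : Nat) (kw : String × Nat) : Nat :=
  if kw.2 < best && PySem.Str.isIn kw.1 t then kw.2 else best

def infer_skills_from_category_py_alt (text_lower : String) : List String :=
  -- _SKILLS[best]; best is always 0..5, in range, so getD is exact here
  pvSkillTable.getD (pvKeywords.foldl (pvStep text_lower) 5) []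

-- ===== PRECONDITION & SPEC =====
def Spec_infer_skills_from_category_py (text_lower : String) (out : List String) : Prop := out = infer_skills_from_category_py_alt text_lower
instance (text_lower : String) (out : List String) : Decidable (Spec_infer_skills_from_category_py text_lower out) := by unfold Spec_infer_skills_from_category_py; infer_instance

-- ===== CLAIM (what is proved, stated in full; the proofs are below) =====
def Claim_equal_infer_skills_from_category_py : Prop := ∀ (text_lower : String), Dom_infer_skills_from_category_py text_lower → Spec_infer_skills_from_category_py text_lower (infer_skills_from_category_py text_lower)

-- ===== LEMMAS AND PROOFS =====

-- pvStep with the substring test abstracted as an opaque predicate (proof helper)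
def pvStepG (q : String → Bool) (best : Nat) (kw : String × Nat) : Nat :=
  if kw.2 < best && q kw.1 then kw.2 else best

-- folding one tagged keyword group: best drops to i exactly when i < best and some keyword matches
theorem pv_foldl_gen (q : String → Bool) (ws : List String) (i b : Nat) :
    (ws.map (fun w => (w, i))).foldl (pvStepG q) b
      = if i < b ∧ ws.any q then i else b := by
  induction ws generalizing b with
  | nil => simp
  | cons w ws ih =>
    simp only [List.map_cons, List.foldl_cons, List.any_cons, pvStepG]
    by_cases hw : q w = true
    · by_cases hb : i < b
      · simp [hw, hb, ih]
      · simp [hw, hb, ih]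
    · simp [hw, ih]

-- ===== VERDICT (by name: the statement is the Claim_ definition above) =====
theorem infer_skills_from_category_py_spec : Claim_equal_infer_skills_from_category_py := by
  intro t _
  unfold Spec_infer_skills_from_category_py infer_skills_from_category_py
    infer_skills_from_category_py_alt pvKeywords
  rw [show pvStep t = pvStepG (fun w => PySem.Str.isIn w t) from rfl]
  generalize (fun w => PySem.Str.isIn w t) = q
  simp only [List.foldl_append, pv_foldl_gen]
  cases h0 : (["software", "developer", "programming", "coding", "web"].any q) <;>
  cases h1 : (["data science", "data analyst", "analytics"].any q) <;>
  cases h2 : (["marketing", "digital marketing", "social media"].any q) <;>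
  cases h3 : (["design", "ui", "ux", "graphic"].any q) <;>
  cases h4 : (["finance", "accounting", "financial"].any q) <;>
  simp [h0, h1, h2, h3, h4, pvSkillTable]
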